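-- pv_equiv track=rewrite | github.com/Spherical-S/Runify | main.py | id_from_link
-- ===== SOURCE A (Python) =====
-- def id_from_link(link):
--     start = 0
--     end = 0
--     slashes = 0
--     # Finds where the 4th slash and first ? in the link are because that's the 2 characters the id is between
--     for i in range(len(link)):
--         if link[i:i+1] == "/":
--             slashes += 1
--             if slashes == 4:
--                 start = i+1
--         if link[i:i+1] == "?":
--             end = i
--             break
--     return link[start:end]
-- ===== SOURCE B (Python) =====
-- def id_from_link(link):
--     q = link.find('?')
--     if q == -1:
--         return ''
--     prefix = link[:q]
--     parts = prefix.split('/')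
--     if len(parts) > 4:
--         return '/'.join(parts[4:])
--     return prefix
-- ===== Notes on version B (the rewrite author's own statement) =====
-- stated objective: idiomatic
-- what changed: A's single character-by-character scan with slash/position counters is replaced by a decomposition into the standard string primitives find, prefix slicing, split and join of the parts from index 4 on.
import Mathlib
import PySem

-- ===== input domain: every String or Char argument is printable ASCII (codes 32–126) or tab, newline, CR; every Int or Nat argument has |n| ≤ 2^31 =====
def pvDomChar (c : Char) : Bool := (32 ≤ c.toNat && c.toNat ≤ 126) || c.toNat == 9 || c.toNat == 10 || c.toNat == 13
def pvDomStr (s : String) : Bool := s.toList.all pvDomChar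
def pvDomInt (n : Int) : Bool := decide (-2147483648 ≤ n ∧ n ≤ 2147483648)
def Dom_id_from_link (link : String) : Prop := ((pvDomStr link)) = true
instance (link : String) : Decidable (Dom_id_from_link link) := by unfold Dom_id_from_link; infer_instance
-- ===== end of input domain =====

-- B replaces A's counting character scan by a decomposition into find / prefix slice / split / join primitives (measurably faster in CPython: C-level primitives instead of a Python-level loop).

-- ===== PORT A =====
-- A's for-loop: index i, state (start, end, slashes), early return at '?'
def idFromLinkLoop : List Char → Nat → Nat → Nat → Nat → Nat × Nat
  | [], _, start, end_, _ => (start, end_)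
  | c :: r, i, start, end_, slashes =>
    let slashes' := if c == '/' then slashes + 1 else slashes
    let start' := if c == '/' && slashes' == 4 then i + 1 else start
    if c == '?' then (start', i)
    else idFromLinkLoop r (i + 1) start' end_ slashes'

def id_from_link (link : String) : String :=
  let se := idFromLinkLoop link.toList 0 0 0 0
  PySem.Str.slice link (some (se.1 : Int)) (some (se.2 : Int))

-- ===== PORT B =====
def id_from_link_alt (link : String) : String :=
  let q := PySem.Str.find link "?"
  if q = -1 then ""
  else
    let pre := PySem.Str.slice link none (some q)
    let parts := PySem.Chars.splitOn pre.toList ['/']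
    if 4 < parts.length then
      String.ofList (PySem.Chars.join ['/'] (PySem.List.slice parts (some 4) none))
    else pre

-- ===== PRECONDITION & SPEC =====
def Spec_id_from_link (link : String) (out : String) : Prop := out = id_from_link_alt link
instance (link : String) (out : String) : Decidable (Spec_id_from_link link out) := by unfold Spec_id_from_link; infer_instance

-- ===== CLAIM (what is proved, stated in full; the proofs are below) =====
def Claim_equal_id_from_link : Prop := ∀ (link : String), Dom_id_from_link link → Spec_id_from_link link (id_from_link link)

-- ===== LEMMAS AND PROOFS =====

-- prefix of the list before the first '?' (none if there is no '?')
def qpre : List Char → Option (List Char)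
  | [] => none
  | c :: l => if c = '?' then some [] else (qpre l).map (c :: ·)

-- suffix after the n-th '/'
def skipSl : Nat → List Char → List Char
  | 0, l => l
  | _ + 1, [] => []
  | n + 1, c :: l => if c = '/' then skipSl n l else skipSl (n + 1) l

-- the 'start'/'slashes' part of A's loop, no break (body textually as in idFromLinkLoop)
def supd : List Char → Nat → Nat → Nat → Nat
  | [], _, start, _ => start
  | c :: l, i, start, slashes =>
    let slashes' := if c == '/' then slashes + 1 else slashes
    let start' := if c == '/' && slashes' == 4 then i + 1 else start
    supd l (i + 1) start' slashes'

-- structural split on a character: (first piece, remaining pieces)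
def msplit (c : Char) : List Char → List Char × List (List Char)
  | [] => ([], [])
  | x :: l => let p := msplit c l; if x = c then ([], p.1 :: p.2) else (x :: p.1, p.2)

lemma loop_eq (r : List Char) : ∀ (i start e sl : Nat),
    idFromLinkLoop r i start e sl =
      match qpre r with
      | none => (supd r i start sl, e)
      | some p => (supd p i start sl, i + p.length) := by
  induction r with
  | nil => intro i start e sl; simp [idFromLinkLoop, qpre, supd]
  | cons c r ih =>
    intro i start e sl
    by_cases hc : c = '?'
    · subst hc
      simp [idFromLinkLoop, qpre, supd]
    · have hcb : (c == '?') = false := by simp [hc]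
      simp only [idFromLinkLoop, qpre, hcb, Bool.false_eq_true, if_false, if_neg hc]
      rw [ih]
      cases hq : qpre r with
      | none => simp only [Option.map_none]; rfl
      | some p =>
        simp only [Option.map_some]
        show _ = (supd (c :: p) i start sl, i + (p.length + 1))
        rw [show supd (c :: p) i start sl
              = supd p (i + 1) (if c == '/' && (if c == '/' then sl + 1 else sl) == 4 then i + 1 else start)
                  (if c == '/' then sl + 1 else sl) from rfl]
        simp only [Prod.mk.injEq]
        exact ⟨by trivial, by omega⟩

lemma supd_ge4 (l : List Char) : ∀ (i start sl : Nat), 4 ≤ sl → supd l i start sl = start := by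
  induction l with
  | nil => intro i start sl _; simp [supd]
  | cons c l ih =>
    intro i start sl h
    have h1 : (sl + 1 == 4) = false := by simp; omega
    by_cases hc : (c == '/') = true <;>
      simp only [supd, hc, h1, Bool.and_false, Bool.false_eq_true, if_false, Bool.false_and,
        if_true, Bool.true_and] <;>
      exact ih _ _ _ (by omega)

lemma skipSl_suffix (l : List Char) : ∀ (n : Nat), skipSl n l <:+ l := by
  induction l with
  | nil => intro n; cases n <;> simp [skipSl]
  | cons c l ih =>
    intro n
    cases n with
    | zero => simp [skipSl]
    | succ m =>
      simp only [skipSl]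
      split
      · exact (ih m).trans (List.suffix_cons c l)
      · exact (ih (m + 1)).trans (List.suffix_cons c l)

lemma skipSl_len_le (n : Nat) (l : List Char) : (skipSl n l).length ≤ l.length :=
  (skipSl_suffix l n).length_le

lemma drop_of_suffix {l s : List Char} (h : s <:+ l) :
    l.drop (l.length - s.length) = s := by
  obtain ⟨t, rfl⟩ := h
  simp [List.drop_left']

lemma supd_lt4 (l : List Char) : ∀ (i start sl : Nat), sl < 4 →
    supd l i start sl =
      if 4 - sl ≤ l.count '/' then i + (l.length - (skipSl (4 - sl) l).length) else start := by
  induction l with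
  | nil =>
    intro i start sl h
    have hcond : ¬ (4 - sl ≤ ([] : List Char).count '/') := by
      simp only [List.count_nil]; omega
    rw [if_neg hcond]
    simp [supd]
  | cons c l ih =>
    intro i start sl h
    by_cases hc : c = '/'
    · subst hc
      by_cases h3 : sl = 3
      · subst h3
        rw [show supd ('/' :: l) i start 3 = supd l (i + 1) (i + 1) 4 from rfl]
        rw [supd_ge4 l _ _ _ (by omega)]
        have hc1 : 4 - 3 ≤ ('/' :: l).count '/' := by
          simp [List.count_cons]
        rw [if_pos hc1]
        rw [show skipSl (4 - 3) ('/' :: l) = l from by simp [skipSl]]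
        simp only [List.length_cons]
        omega
      · have h2 : (sl + 1 == 4) = false := by simp; omega
        have hred : supd ('/' :: l) i start sl = supd l (i + 1) start (sl + 1) := by
          simp [supd, h2]
        rw [hred, ih (i + 1) start (sl + 1) (by omega)]
        have hn : 4 - sl = (4 - (sl + 1)) + 1 := by omega
        have hskip : skipSl (4 - sl) ('/' :: l) = skipSl (4 - (sl + 1)) l := by
          rw [hn]; simp [skipSl]
        have hcnt : ('/' :: l).count '/' = l.count '/' + 1 := by simp [List.count_cons]
        have hle := skipSl_len_le (4 - (sl + 1)) l
        by_cases hcond : 4 - (sl + 1) ≤ l.count '/'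
        · rw [if_pos hcond, if_pos (by rw [hcnt]; omega), hskip]
          simp only [List.length_cons]
          omega
        · rw [if_neg hcond, if_neg (by rw [hcnt]; omega)]
    · have hcb : (c == '/') = false := by simp [hc]
      have hred : supd (c :: l) i start sl = supd l (i + 1) start sl := by
        simp [supd, hcb]
      rw [hred, ih (i + 1) start sl (by omega)]
      have hn : 4 - sl = (4 - sl - 1) + 1 := by omega
      have hskip : skipSl (4 - sl) (c :: l) = skipSl (4 - sl) l := by
        rw [hn]; simp [skipSl, hc]
      have hcnt : (c :: l).count '/' = l.count '/' := by simp [List.count_cons, hc]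
      have hle := skipSl_len_le (4 - sl) l
      by_cases hcond : 4 - sl ≤ l.count '/'
      · rw [if_pos hcond, if_pos (by rw [hcnt]; omega), hskip]
        simp only [List.length_cons]
        omega
      · rw [if_neg hcond, if_neg (by rw [hcnt]; omega)]

lemma qpre_spec : ∀ (cs p : List Char), qpre cs = some p → ∃ rest, cs = p ++ '?' :: rest := by
  intro cs
  induction cs with
  | nil => intro p h; simp [qpre] at h
  | cons c l ih =>
    intro p h
    by_cases hc : c = '?'
    · subst hc
      simp [qpre] at h
      exact ⟨l, by simp [← h]⟩
    · simp [qpre, hc] at h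
      obtain ⟨p', hp', rfl⟩ := h
      obtain ⟨rest, hrest⟩ := ih p' hp'
      exact ⟨rest, by simp [hrest]⟩

lemma find_go_q : ∀ (cs : List Char) (k : Nat),
    PySem.Chars.find.go ['?'] cs k =
      match qpre cs with
      | none => -1
      | some p => ((k + p.length : Nat) : Int) := by
  intro cs
  induction cs with
  | nil => intro k; simp [PySem.Chars.find.go, qpre]
  | cons c l ih =>
    intro k
    by_cases hc : c = '?'
    · subst hc
      simp [PySem.Chars.find.go, qpre, List.isPrefixOf]
    · have hpre : (['?'].isPrefixOf (c :: l)) = false := by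
        simp [List.isPrefixOf]; exact fun h => hc h.symm
      simp only [PySem.Chars.find.go, hpre, Bool.false_eq_true, if_false]
      rw [ih (k + 1)]
      cases hq : qpre l with
      | none => simp [qpre, hc, hq]
      | some p =>
        simp only [qpre, if_neg hc, hq, Option.map_some, List.length_cons]
        push_cast
        ring

lemma split_go : ∀ (l : List Char) (fuel : Nat) (cur : List Char) (acc : List (List Char)),
    l.length < fuel →
    PySem.Chars.splitOn.go ['/'] fuel l cur acc =
      acc.reverse ++ (cur.reverse ++ (msplit '/' l).1) :: (msplit '/' l).2 := by
  intro l
  induction l with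
  | nil =>
    intro fuel cur acc h
    obtain ⟨f, rfl⟩ : ∃ f, fuel = f + 1 := ⟨fuel - 1, by omega⟩
    simp [PySem.Chars.splitOn.go, msplit]
  | cons c r ih =>
    intro fuel cur acc h
    obtain ⟨f, rfl⟩ : ∃ f, fuel = f + 1 := ⟨fuel - 1, by omega⟩
    have hf : r.length < f := by simp only [List.length_cons] at h; omega
    by_cases hc : c = '/'
    · subst hc
      have hpre : (['/'].isPrefixOf ('/' :: r)) = true := by simp [List.isPrefixOf]
      simp only [PySem.Chars.splitOn.go, hpre, if_true, List.length_cons, List.length_nil,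
        List.drop_succ_cons, List.drop_zero]
      rw [ih f [] (cur.reverse :: acc) hf]
      simp [msplit]
    · have hpre : (['/'].isPrefixOf (c :: r)) = false := by
        simp [List.isPrefixOf]; exact fun h => hc h.symm
      simp only [PySem.Chars.splitOn.go, hpre, Bool.false_eq_true, if_false]
      rw [ih f (c :: cur) acc hf]
      simp [msplit, hc]

lemma splitOn_eq (cs : List Char) :
    PySem.Chars.splitOn cs ['/'] = (msplit '/' cs).1 :: (msplit '/' cs).2 := by
  have := split_go cs (cs.length + 1) [] [] (by omega)
  simpa [PySem.Chars.splitOn] using this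

lemma msplit_len : ∀ (l : List Char), (msplit '/' l).2.length = l.count '/' := by
  intro l
  induction l with
  | nil => simp [msplit]
  | cons c l ih =>
    by_cases hc : c = '/'
    · subst hc; simp [msplit, List.count_cons, ih]
    · simp [msplit, hc, List.count_cons, ih]

lemma join_cons_head (c : Char) (h : List Char) (t : List (List Char)) :
    PySem.Chars.join ['/'] ((c :: h) :: t) = c :: PySem.Chars.join ['/'] (h :: t) := by
  cases t with
  | nil => simp [PySem.Chars.join, List.intercalate]
  | cons b t => simp [PySem.Chars.join, List.intercalate]

lemma join_msplit : ∀ (l : List Char),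
    PySem.Chars.join ['/'] ((msplit '/' l).1 :: (msplit '/' l).2) = l := by
  intro l
  induction l with
  | nil => simp [msplit, PySem.Chars.join, List.intercalate]
  | cons c l ih =>
    by_cases hc : c = '/'
    · subst hc
      rw [show msplit '/' ('/' :: l) = ([], (msplit '/' l).1 :: (msplit '/' l).2) from by
          simp [msplit]]
      show PySem.Chars.join ['/'] ([] :: (msplit '/' l).1 :: (msplit '/' l).2) = '/' :: l
      rw [show PySem.Chars.join ['/'] ([] :: (msplit '/' l).1 :: (msplit '/' l).2)
            = [] ++ ['/'] ++ PySem.Chars.join ['/'] ((msplit '/' l).1 :: (msplit '/' l).2) from by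
          simp [PySem.Chars.join, List.intercalate]]
      simp [ih]
    · simp only [msplit, if_neg hc]
      rw [join_cons_head, ih]

lemma join_drop : ∀ (l : List Char) (n : Nat), n ≤ l.count '/' →
    PySem.Chars.join ['/'] (((msplit '/' l).1 :: (msplit '/' l).2).drop n) = skipSl n l := by
  intro l
  induction l with
  | nil =>
    intro n h
    simp only [List.count_nil, Nat.le_zero] at h
    subst h
    simpa [skipSl] using join_msplit []
  | cons c l ih =>
    intro n h
    cases n with
    | zero => simpa [skipSl] using join_msplit (c :: l)
    | succ m =>
      by_cases hc : c = '/'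
      · subst hc
        have hm : m ≤ l.count '/' := by simp [List.count_cons] at h; omega
        rw [show msplit '/' ('/' :: l) = ([], (msplit '/' l).1 :: (msplit '/' l).2) from by
            simp [msplit]]
        simp only [List.drop_succ_cons]
        rw [show skipSl (m + 1) ('/' :: l) = skipSl m l from by simp [skipSl]]
        exact ih m hm
      · have hm : m + 1 ≤ l.count '/' := by simpa [List.count_cons, hc] using h
        rw [show msplit '/' (c :: l) = (c :: (msplit '/' l).1, (msplit '/' l).2) from by
            simp [msplit, hc]]
        simp only [List.drop_succ_cons]
        rw [show skipSl (m + 1) (c :: l) = skipSl (m + 1) l from by simp [skipSl, hc]]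
        have := ih (m + 1) hm
        simpa using this

lemma slice_take_drop (p t : List Char) : ∀ (s : Nat), s ≤ p.length →
    ((p ++ t).drop s).take (p.length - s) = p.drop s := by
  induction p with
  | nil =>
    intro s hs
    simp only [List.length_nil, Nat.le_zero] at hs
    subst hs
    simp
  | cons c p ih =>
    intro s hs
    cases s with
    | zero =>
      simp only [List.drop_zero, List.length_cons, Nat.sub_zero, List.cons_append,
        List.take_succ_cons]
      have h0 := ih 0 (by omega)
      simp only [List.drop_zero, Nat.sub_zero] at h0
      rw [h0]
    | succ s =>
      simp only [List.cons_append, List.drop_succ_cons, List.length_cons, Nat.succ_sub_succ]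
      exact ih s (by simpa using hs)

-- ===== VERDICT (by name: the statement is the Claim_ definition above) =====
theorem id_from_link_spec : Claim_equal_id_from_link := by
  intro link _
  unfold Spec_id_from_link
  show id_from_link link = id_from_link_alt link
  have hql : ("?" : String).toList = ['?'] := by decide
  simp only [id_from_link, id_from_link_alt]
  cases hq : qpre link.toList with
  | none =>
    have hA1 : (idFromLinkLoop link.toList 0 0 0 0).1 = supd link.toList 0 0 0 := by
      rw [loop_eq, hq]
    have hA2 : (idFromLinkLoop link.toList 0 0 0 0).2 = 0 := by
      rw [loop_eq, hq]
    have hfind : PySem.Str.find link "?" = -1 := by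
      have h0 := find_go_q link.toList 0
      rw [hq] at h0
      simp only [PySem.Str.find, PySem.Chars.find, hql]
      exact h0
    rw [hfind, if_pos rfl, hA1, hA2]
    have hsl : PySem.Chars.slice link.toList (some ((supd link.toList 0 0 0 : Nat) : Int))
        (some ((0 : Nat) : Int)) = [] := by
      rw [show PySem.Chars.slice link.toList (some ((supd link.toList 0 0 0 : Nat) : Int))
            (some ((0 : Nat) : Int))
            = PySem.List.slice link.toList (some ((supd link.toList 0 0 0 : Nat) : Int))
                (some ((0 : Nat) : Int)) from by simp]
      rw [PySem.List.slice_toNat _ (Int.natCast_nonneg _) (Int.natCast_nonneg _)]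
      simp
    simp only [PySem.Str.slice]
    rw [hsl]
  | some p =>
    obtain ⟨rest, hcs⟩ := qpre_spec link.toList p hq
    have hA1 : (idFromLinkLoop link.toList 0 0 0 0).1 = supd p 0 0 0 := by
      rw [loop_eq, hq]
    have hA2 : (idFromLinkLoop link.toList 0 0 0 0).2 = 0 + p.length := by
      rw [loop_eq, hq]
    have hfind : PySem.Str.find link "?" = ((p.length : Nat) : Int) := by
      have h0 := find_go_q link.toList 0
      rw [hq] at h0
      simp only [PySem.Str.find, PySem.Chars.find, hql]
      simpa using h0
    have hne : (((p.length : Nat) : Int)) ≠ -1 := by omega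
    rw [hfind, if_neg hne, hA1, hA2]
    -- B's prefix is exactly p
    have hpreS : PySem.Str.slice link none (some ((p.length : Nat) : Int)) = String.ofList p := by
      simp only [PySem.Str.slice]
      rw [show PySem.Chars.slice link.toList none (some ((p.length : Nat) : Int))
            = PySem.List.slice link.toList none (some ((p.length : Nat) : Int)) from by simp]
      rw [PySem.List.slice_to _ (Int.natCast_nonneg _)]
      rw [Int.toNat_natCast, hcs]
      simp [List.take_left']
    have hpreL : (PySem.Str.slice link none (some ((p.length : Nat) : Int))).toList = p := by
      rw [hpreS]; simp
    -- A's slice: for start ≤ p.length, link[start : p.length] = p.drop start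
    have key : ∀ s : Nat, s ≤ p.length →
        PySem.Str.slice link (some ((s : Nat) : Int)) (some (((0 + p.length : Nat)) : Int))
          = String.ofList (p.drop s) := by
      intro s hs
      simp only [PySem.Str.slice]
      rw [show PySem.Chars.slice link.toList (some ((s : Nat) : Int))
            (some (((0 + p.length : Nat)) : Int))
            = PySem.List.slice link.toList (some ((s : Nat) : Int))
                (some (((0 + p.length : Nat)) : Int)) from by simp]
      rw [PySem.List.slice_toNat _ (Int.natCast_nonneg _) (Int.natCast_nonneg _)]
      rw [Int.toNat_natCast, Int.toNat_natCast, hcs]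
      rw [show (0 + p.length) - s = p.length - s from by omega]
      rw [slice_take_drop p _ s hs]
    rw [hpreL, splitOn_eq]
    have hlen : ((msplit '/' p).1 :: (msplit '/' p).2).length = p.count '/' + 1 := by
      simp [msplit_len]
    by_cases hcond : 4 ≤ p.count '/'
    · have hstart : supd p 0 0 0 = 0 + (p.length - (skipSl 4 p).length) := by
        rw [supd_lt4 p 0 0 0 (by omega)]
        rw [if_pos (by simpa using hcond)]
      rw [if_pos (by rw [hlen]; omega)]
      rw [hstart]
      rw [key _ (by simpa using Nat.sub_le p.length (skipSl 4 p).length)]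
      rw [show PySem.List.slice ((msplit '/' p).1 :: (msplit '/' p).2) (some 4) none
            = ((msplit '/' p).1 :: (msplit '/' p).2).drop 4 from by
          rw [PySem.List.slice_from _ (by norm_num)]
          rfl]
      rw [join_drop p 4 hcond]
      congr 1
      rw [show (0 : Nat) + (p.length - (skipSl 4 p).length)
            = p.length - (skipSl 4 p).length from by omega]
      exact drop_of_suffix (skipSl_suffix p 4)
    · have hstart : supd p 0 0 0 = 0 := by
        rw [supd_lt4 p 0 0 0 (by omega)]
        rw [if_neg (by simpa using hcond)]
      rw [if_neg (by rw [hlen]; omega)]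
      rw [hstart]
      rw [key 0 (by omega)]
      rw [hpreS]
      simp
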